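-- pv_equiv track=rewrite | github.com/bhrigu136/DSA-Python | LeetCode-Solutions/Remove_Duplicates_26.py | return_unique
-- ===== SOURCE A (Python) =====
-- def return_unique(arr):
--     n = len(arr)
--     if n == 0:
--         return 0
--
--     i = 1
--     j = 0
--     while i < n:
--         if arr[i] == arr[j]:
--             i += 1
--         else:
--             j += 1
--             arr[j] = arr[i]
--             i += 1
--
--     return j + 1
-- ===== SOURCE B (Python) =====
-- def return_unique(arr):
--     if not arr:
--         return 0
--     u = [arr[0]]
--     for x in arr[1:]:
--         if x != u[-1]:
--             u.append(x)
--     arr[:len(u)] = u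
--     return len(u)
-- ===== Notes on version B (the rewrite author's own statement) =====
-- stated objective: simpler
-- what changed: Replaces the two-pointer read/write-interleaved while loop over indices with a single pass collecting the run-heads into a fresh list (comparing each element to the last collected one) followed by one slice assignment copying the prefix back.
import Mathlib
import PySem

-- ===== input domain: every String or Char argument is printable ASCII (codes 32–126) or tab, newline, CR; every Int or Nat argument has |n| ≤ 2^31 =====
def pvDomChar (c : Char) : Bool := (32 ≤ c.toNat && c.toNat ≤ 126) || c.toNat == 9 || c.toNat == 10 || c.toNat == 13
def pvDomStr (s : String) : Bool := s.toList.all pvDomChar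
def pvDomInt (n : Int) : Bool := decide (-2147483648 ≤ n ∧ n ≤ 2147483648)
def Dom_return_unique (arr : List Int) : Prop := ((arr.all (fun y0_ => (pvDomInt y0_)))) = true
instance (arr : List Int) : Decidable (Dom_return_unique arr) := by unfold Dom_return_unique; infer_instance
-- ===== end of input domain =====

-- B collects the run-heads into a fresh list in one pass, then copies them back with one
-- slice assignment, instead of A's interleaved read/write two-pointer loop; equivalence is
-- proved for the RETURN value (both Pythons also leave the list in the same mutated state).

-- ===== PORT A =====
-- while i < n loop; all indices read/written are provably in range, so getD 0 is exact
def aLoop (n : Nat) (arr : List Int) (i j : Nat) : Int :=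
  if i < n then
    if arr.getD i 0 = arr.getD j 0 then
      aLoop n arr (i + 1) j
    else
      aLoop n (arr.set (j + 1) (arr.getD i 0)) (i + 1) (j + 1)
  else
    (j : Int) + 1
termination_by n - i

def return_unique (arr : List Int) : Int :=
  let n := arr.length
  if n = 0 then 0
  else aLoop n arr 1 0

-- ===== PORT B =====
-- u[-1] via pyGet?; u is never empty when read, so .getD 0 is exact
def bStep (u : List Int) (x : Int) : List Int :=
  if x ≠ (PySem.List.pyGet? u (-1)).getD 0 then u ++ [x] else u

def return_unique_alt (arr : List Int) : Int :=
  match arr with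
  | [] => 0
  | a :: rest => ((rest.foldl bStep [a]).length : Int)

-- ===== PRECONDITION & SPEC =====
def Spec_return_unique (arr : List Int) (out : Int) : Prop := out = return_unique_alt arr
instance (arr : List Int) (out : Int) : Decidable (Spec_return_unique arr out) := by unfold Spec_return_unique; infer_instance

-- ===== CLAIM (what is proved, stated in full; the proofs are below) =====
def Claim_equal_return_unique : Prop := ∀ (arr : List Int), Dom_return_unique arr → Spec_return_unique arr (return_unique arr)

-- ===== LEMMAS AND PROOFS =====

-- number of positions whose value differs from its predecessor (prev = value before the list)
def cnt (prev : Int) : List Int → Nat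
  | [] => 0
  | x :: xs => (if x = prev then 0 else 1) + cnt x xs

lemma pyGet_neg_one_append (u : List Int) (v : Int) :
    PySem.List.pyGet? (u ++ [v]) (-1) = some v := by
  simp [PySem.List.pyGet?, PySem.List.pyIdx?]

lemma bfold (xs : List Int) : ∀ (u : List Int) (v : Int),
    (xs.foldl bStep (u ++ [v])).length = u.length + 1 + cnt v xs := by
  induction xs with
  | nil => intro u v; simp [cnt]
  | cons x xs ih =>
    intro u v
    by_cases h : x = v
    · subst h
      have hs : bStep (u ++ [x]) x = u ++ [x] := by
        rw [bStep, pyGet_neg_one_append]; simp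
      rw [List.foldl_cons, hs, ih u x, cnt, if_pos rfl]; omega
    · have hs : bStep (u ++ [v]) x = (u ++ [v]) ++ [x] := by
        rw [bStep, pyGet_neg_one_append]; simp [h]
      simp only [List.foldl_cons, hs]
      rw [ih (u ++ [v]) x, cnt, if_neg h]
      simp
      omega

lemma aLoop_eq (n : Nat) (fuel : Nat) :
    ∀ (arr : List Int) (i j : Nat), n = arr.length → fuel = n - i → j < i →
    aLoop n arr i j = (j : Int) + 1 + cnt (arr.getD j 0) (arr.drop i) := by
  induction fuel with
  | zero =>
    intro arr i j hn hf hj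
    have h1 : ¬ i < n := by omega
    rw [aLoop, if_neg h1]
    rw [List.drop_eq_nil_of_le (by omega : arr.length ≤ i)]
    simp [cnt]
  | succ f ih =>
    intro arr i j hn hf hj
    rw [aLoop]
    by_cases hi : i < n
    · rw [if_pos hi]
      have hdrop : arr.drop i = arr.getD i 0 :: arr.drop (i + 1) := by
        rw [List.getD_eq_getElem?_getD, List.drop_eq_getElem_cons (by omega)]
        simp [List.getElem?_eq_getElem (by omega : i < arr.length)]
      by_cases he : arr.getD i 0 = arr.getD j 0
      · rw [if_pos he]
        rw [ih arr (i + 1) j hn (by omega) (by omega)]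
        rw [hdrop, cnt, if_pos he, he]
        simp
      · rw [if_neg he]
        set arr' := arr.set (j + 1) (arr.getD i 0) with harr'
        have hj1 : j + 1 < arr.length := by omega
        have hget : arr'.getD (j + 1) 0 = arr.getD i 0 := by
          simp [harr', List.getD_eq_getElem?_getD,
            List.getElem?_set_self (by omega : j + 1 < arr.length)]
        have hdrop' : arr'.drop (i + 1) = arr.drop (i + 1) := by
          apply List.ext_getElem
          · simp [harr']
          · intro k h1 h2
            simp only [harr', List.getElem_drop]
            rw [List.getElem_set_ne (by omega)]
        rw [ih arr' (i + 1) (j + 1) (by simp [harr', hn]) (by omega) (by omega)]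
        rw [hget, hdrop', hdrop, cnt, if_neg he]
        push_cast
        ring
    · rw [if_neg hi]
      rw [hn] at hi
      rw [List.drop_eq_nil_of_le (by omega : arr.length ≤ i)]
      simp [cnt]

lemma alt_eq (a : Int) (rest : List Int) :
    return_unique_alt (a :: rest) = 1 + (cnt a rest : Int) := by
  have h := bfold rest [] a
  simp only [List.nil_append, List.length_nil] at h
  simp [return_unique_alt, h]

-- ===== VERDICT (by name: the statement is the Claim_ definition above) =====
theorem return_unique_spec : Claim_equal_return_unique := by
  intro arr _
  unfold Spec_return_unique
  match arr with
  | [] => rfl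
  | a :: rest =>
    show return_unique (a :: rest) = _
    rw [alt_eq]
    unfold return_unique
    simp only [List.length_cons]
    rw [if_neg (by omega)]
    rw [aLoop_eq (rest.length + 1) (rest.length) (a :: rest) 1 0 (by simp) (by omega) (by omega)]
    simp
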